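-- pv_equiv track=rewrite | github.com/MaximeMoutet13/Stage_2020 | tbs/gamma_free/_gamma_free_column_ordering.py | matrix_count_number_1_under
-- ===== SOURCE A (Python) =====
-- def matrix_count_number_1_under(matrix):
--     reverse_matrix_count = [[element and 1 or 0 for element in matrix[-1]]]
--
--     for l in range(len(matrix) - 2, -1, -1):
--         line = []
--         for c in range(len(matrix[l])):
--             line.append(reverse_matrix_count[-1][c] + (matrix[l][c] and 1 or 0))
--         reverse_matrix_count.append(line)
--
--     reverse_matrix_count.reverse()
--     return reverse_matrix_count
-- ===== SOURCE B (Python) =====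
-- def matrix_count_number_1_under(matrix):
--     nrows, ncols = len(matrix), len(matrix[-1])
--     cols = []
--     for c in range(ncols):
--         acc = 0
--         col = []
--         for r in range(nrows - 1, -1, -1):
--             if matrix[r][c]:
--                 acc += 1
--             col.append(acc)
--         col.reverse()
--         cols.append(col)
--     return [[cols[c][r] for c in range(ncols)] for r in range(nrows)]
-- ===== Notes on version B (the rewrite author's own statement) =====
-- stated objective: alternative
-- what changed: B traverses column-by-column with one scalar suffix accumulator per column (then assembles rows by index), instead of A's row-by-row bottom-up pass that keeps and indexes the whole previous result row and reverses the result list at the end.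
-- outside the precondition, e.g. on matrix_count_number_1_under([[1], [1, 1]]): A returns [[2], [1, 1]], B raises IndexError
import Mathlib
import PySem

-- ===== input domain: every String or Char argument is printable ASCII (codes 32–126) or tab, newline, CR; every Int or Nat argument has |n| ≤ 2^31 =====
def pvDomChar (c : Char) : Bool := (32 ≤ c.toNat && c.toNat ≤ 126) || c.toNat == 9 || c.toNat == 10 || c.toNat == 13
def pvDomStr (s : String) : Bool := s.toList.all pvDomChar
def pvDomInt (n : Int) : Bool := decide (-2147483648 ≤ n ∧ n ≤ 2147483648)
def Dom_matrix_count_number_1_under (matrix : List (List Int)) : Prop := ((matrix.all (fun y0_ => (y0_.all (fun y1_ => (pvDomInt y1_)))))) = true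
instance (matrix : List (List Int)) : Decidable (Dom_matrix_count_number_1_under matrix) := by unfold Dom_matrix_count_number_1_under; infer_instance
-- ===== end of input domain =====

-- B counts 1s per column with a single scalar suffix accumulator (column-by-column, bottom-up),
-- instead of A's row-by-row pass that indexes the whole previous result row; same cost, different traversal.
-- ===== PORT A =====
def matrix_count_number_1_under (matrix : List (List Int)) : List (List Int) :=
  let base := (PySem.List.pyGetD matrix (-1) []).map (fun e => if e ≠ 0 then (1:Int) else 0)
  let rev := (PySem.List.pyRange ((matrix.length : Int) - 2) (-1) (-1)).foldl
    (fun acc l =>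
      let line := (PySem.List.pyRange 0 ((PySem.List.pyGetD matrix l []).length : Int) 1).foldl
        (fun line c =>
          line ++ [PySem.List.pyGetD (PySem.List.pyGetD acc (-1) []) c 0 +
            (if PySem.List.pyGetD (PySem.List.pyGetD matrix l []) c 0 ≠ 0 then (1:Int) else 0)]) []
      acc ++ [line]) [base]
  rev.reverse

-- ===== PORT B =====
def matrix_count_number_1_under_alt (matrix : List (List Int)) : List (List Int) :=
  let nrows : Int := matrix.length
  let ncols : Int := (PySem.List.pyGetD matrix (-1) []).length
  let cols := (PySem.List.pyRange 0 ncols 1).foldl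
    (fun cols c =>
      let p := (PySem.List.pyRange (nrows - 1) (-1) (-1)).foldl
        (fun (p : Int × List Int) r =>
          let acc := if PySem.List.pyGetD (PySem.List.pyGetD matrix r []) c 0 ≠ 0 then p.1 + 1 else p.1
          (acc, p.2 ++ [acc])) ((0 : Int), ([] : List Int))
      cols ++ [p.2.reverse]) []
  (PySem.List.pyRange 0 nrows 1).map (fun r =>
    (PySem.List.pyRange 0 ncols 1).map (fun c =>
      PySem.List.pyGetD (PySem.List.pyGetD cols c []) r 0))

-- ===== PRECONDITION & SPEC =====
-- Pre_ excludes the empty matrix (both programs raise IndexError on matrix[-1]) and ragged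
-- matrices: A happens to return a truncated grid when row lengths never grow downward, while B raises.
def Pre_matrix_count_number_1_under (matrix : List (List Int)) : Prop :=
  matrix ≠ [] ∧ ∀ row ∈ matrix, row.length = (matrix.headD []).length
instance (matrix : List (List Int)) : Decidable (Pre_matrix_count_number_1_under matrix) := by
  unfold Pre_matrix_count_number_1_under; infer_instance
def pvWitness_matrix_count_number_1_under : List (List Int) := [[1, 0, 2], [0, 0, 1]]
def Spec_matrix_count_number_1_under (matrix : List (List Int)) (out : List (List Int)) : Prop := out = matrix_count_number_1_under_alt matrix
instance (matrix : List (List Int)) (out : List (List Int)) : Decidable (Spec_matrix_count_number_1_under matrix out) := by unfold Spec_matrix_count_number_1_under; infer_instance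

-- ===== CLAIM (what is proved, stated in full; the proofs are below) =====
def Claim_equal_matrix_count_number_1_under : Prop := ∀ (matrix : List (List Int)), Dom_matrix_count_number_1_under matrix → Pre_matrix_count_number_1_under matrix → Spec_matrix_count_number_1_under matrix (matrix_count_number_1_under matrix)

-- ===== LEMMAS AND PROOFS =====
-- pvInd c row = 1 if row[c] is nonzero else 0; pvCnt matrix c r = count of nonzero entries in column c from row r down
def pvInd (c : Int) (row : List Int) : Int := if PySem.List.pyGetD row c 0 ≠ 0 then 1 else 0

def pvCnt (matrix : List (List Int)) (c : Int) (r : Nat) : Int :=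
  ((matrix.drop r).map (pvInd c)).sum

def pvRow (matrix : List (List Int)) (n : Nat) (r : Nat) : List Int :=
  (PySem.List.pyRange 0 (n : Int) 1).map (fun c => pvCnt matrix c r)

theorem pvCnt_length (matrix : List (List Int)) (c : Int) : pvCnt matrix c matrix.length = 0 := by
  simp [pvCnt]

theorem pvCnt_rec (matrix : List (List Int)) (c : Int) (r : Nat) (h : r < matrix.length) :
    pvCnt matrix c r = pvInd c matrix[r] + pvCnt matrix c (r + 1) := by
  unfold pvCnt
  rw [List.drop_eq_getElem_cons h, List.map_cons, List.sum_cons]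

theorem pvMapGet {α : Type} (xs : List Int) (n : Nat) (h : xs.length = n) (g : Int → α) (d : Int) :
    (PySem.List.pyRange 0 (n : Int) 1).map (fun c => g (PySem.List.pyGetD xs c d)) = xs.map g := by
  subst h
  conv_rhs => rw [← PySem.List.map_pyGetD_pyRange_zero' xs d]
  rw [List.map_map]
  rfl

theorem pvRevMap {α : Type} (k : Nat) (f : Nat → α) :
    ((List.range k).map (fun j => f (k - 1 - j))).reverse = (List.range k).map f := by
  apply List.ext_getElem (by simp)
  intro i h1 h2
  simp only [List.length_reverse, List.length_map, List.length_range] at h1 h2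
  rw [List.getElem_reverse]
  simp only [List.getElem_map, List.getElem_range, List.length_map, List.length_range]
  congr 1
  omega

theorem pvRangeSuccMap {α : Type} (k : Nat) (f : Nat → α) :
    (List.range (k + 1)).map (fun j => f (k + 1 - 1 - j)) =
      f k :: (List.range k).map (fun j => f (k - 1 - j)) := by
  rw [List.range_succ_eq_map]
  simp only [List.map_cons, List.map_map]
  congr 1
  apply List.map_congr_left
  intro j _
  show f (k + 1 - 1 - (j + 1)) = f (k - 1 - j)
  congr 1
  omega

theorem pvLoopA (matrix : List (List Int)) (n : Nat)
    (hrect : ∀ row ∈ matrix, row.length = n) :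
    ∀ (k : Nat) (acc : List (List Int)), k ≤ matrix.length →
      acc.getLast? = some (pvRow matrix n k) →
      (PySem.List.pyRange ((k : Int) - 1) (-1) (-1)).foldl
        (fun acc l =>
          acc ++ [(PySem.List.pyRange 0 ((PySem.List.pyGetD matrix l []).length : Int) 1).foldl
            (fun line c =>
              line ++ [PySem.List.pyGetD (PySem.List.pyGetD acc (-1) []) c 0 +
                (if PySem.List.pyGetD (PySem.List.pyGetD matrix l []) c 0 ≠ 0 then (1:Int) else 0)]) []]) acc
      = acc ++ (List.range k).map (fun j => pvRow matrix n (k - 1 - j)) := by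
  intro k
  induction k with
  | zero =>
    intro acc _ _
    rw [PySem.List.pyRange_neg_one_eq_nil (by omega)]
    simp
  | succ k ih =>
    intro acc hk hlast
    have hk' : k < matrix.length := by omega
    have hcast : ((k + 1 : Nat) : Int) - 1 = (k : Int) := by push_cast; ring
    rw [hcast, PySem.List.pyRange_neg_one_cons (by omega : (-1:Int) < (k:Int))]
    simp only [List.foldl_cons]
    have hne : acc ≠ [] := by
      intro h; rw [h] at hlast; simp at hlast
    have hprev : PySem.List.pyGetD acc (-1) [] = pvRow matrix n (k + 1) := by
      rw [PySem.List.pyGetD_neg_one acc [] hne]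
      rw [List.getLast?_eq_some_getLast hne] at hlast
      exact Option.some.inj hlast
    have hget : PySem.List.pyGetD matrix (k : Int) [] = matrix[k] :=
      PySem.List.pyGetD_ofNat matrix k [] hk'
    have hlen : matrix[k].length = n := hrect _ (List.getElem_mem hk')
    have hline : (PySem.List.pyRange 0 ((PySem.List.pyGetD matrix (k:Int) []).length : Int) 1).foldl
        (fun line c =>
          line ++ [PySem.List.pyGetD (PySem.List.pyGetD acc (-1) []) c 0 +
            (if PySem.List.pyGetD (PySem.List.pyGetD matrix (k:Int) []) c 0 ≠ 0 then (1:Int) else 0)]) []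
        = pvRow matrix n k := by
      rw [PySem.List.foldl_append_singleton_eq_map, List.nil_append, hget, hlen, hprev, pvRow]
      apply List.map_congr_left
      intro c hc
      rw [PySem.List.mem_pyRange_one] at hc
      rw [PySem.List.pyGetD_map_pyRange_of_nonneg _ _ _ _ hc.1 hc.2]
      rw [pvCnt_rec matrix c k hk']
      unfold pvInd
      ring
    rw [hline]
    rw [ih (acc ++ [pvRow matrix n k]) (by omega) (by rw [List.getLast?_concat])]
    rw [pvRangeSuccMap k (pvRow matrix n)]
    simp

theorem pvA_eq (matrix : List (List Int)) (n : Nat) (hne : matrix ≠ [])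
    (hrect : ∀ row ∈ matrix, row.length = n) :
    matrix_count_number_1_under matrix = (List.range matrix.length).map (pvRow matrix n) := by
  have hm : 1 ≤ matrix.length := List.length_pos_iff.mpr hne
  have hlastget : PySem.List.pyGetD matrix (-1) [] = matrix.getLast hne :=
    PySem.List.pyGetD_neg_one matrix [] hne
  have hlen : (matrix.getLast hne).length = n := hrect _ (List.getLast_mem hne)
  have hdrop : matrix.drop (matrix.length - 1) = [matrix.getLast hne] := by
    rw [List.getLast_eq_getElem, List.drop_eq_getElem_cons (by omega)]
    have h1 : matrix.length - 1 + 1 = matrix.length := by omega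
    rw [h1, List.drop_length]
  have hbase : (PySem.List.pyGetD matrix (-1) []).map (fun e => if e ≠ 0 then (1:Int) else 0)
      = pvRow matrix n (matrix.length - 1) := by
    rw [hlastget, pvRow]
    symm
    calc (PySem.List.pyRange 0 (n : Int) 1).map (fun c => pvCnt matrix c (matrix.length - 1))
        = (PySem.List.pyRange 0 (n : Int) 1).map
            (fun c => (fun x => if x ≠ 0 then (1:Int) else 0)
              (PySem.List.pyGetD (matrix.getLast hne) c 0)) := by
          apply List.map_congr_left
          intro c _
          unfold pvCnt
          rw [hdrop]
          simp [pvInd]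
      _ = (matrix.getLast hne).map (fun e => if e ≠ 0 then (1:Int) else 0) :=
          pvMapGet (matrix.getLast hne) n hlen (fun x => if x ≠ 0 then (1:Int) else 0) 0
  simp only [matrix_count_number_1_under]
  have hcast : ((matrix.length : Int) - 2) = ((matrix.length - 1 : Nat) : Int) - 1 := by omega
  rw [hcast, hbase]
  rw [pvLoopA matrix n hrect (matrix.length - 1) [pvRow matrix n (matrix.length - 1)]
    (by omega) (by simp)]
  rw [List.singleton_append, List.reverse_cons, pvRevMap]
  have h2 : matrix.length = (matrix.length - 1) + 1 := by omega
  conv_rhs => rw [h2, List.range_succ, List.map_append]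
  simp

theorem pvLoopB (matrix : List (List Int)) (c : Int) :
    ∀ (k : Nat) (col : List Int), k ≤ matrix.length →
      (PySem.List.pyRange ((k : Int) - 1) (-1) (-1)).foldl
        (fun (p : Int × List Int) r =>
          ((if PySem.List.pyGetD (PySem.List.pyGetD matrix r []) c 0 ≠ 0 then p.1 + 1 else p.1),
           p.2 ++ [if PySem.List.pyGetD (PySem.List.pyGetD matrix r []) c 0 ≠ 0 then p.1 + 1 else p.1]))
        (pvCnt matrix c k, col)
      = (pvCnt matrix c 0, col ++ (List.range k).map (fun j => pvCnt matrix c (k - 1 - j))) := by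
  intro k
  induction k with
  | zero =>
    intro col _
    rw [PySem.List.pyRange_neg_one_eq_nil (by omega)]
    simp
  | succ k ih =>
    intro col hk
    have hk' : k < matrix.length := by omega
    have hcast : ((k + 1 : Nat) : Int) - 1 = (k : Int) := by push_cast; ring
    rw [hcast, PySem.List.pyRange_neg_one_cons (by omega : (-1:Int) < (k:Int))]
    simp only [List.foldl_cons]
    have hstep : (if PySem.List.pyGetD (PySem.List.pyGetD matrix (k:Int) []) c 0 ≠ 0
        then pvCnt matrix c (k + 1) + 1 else pvCnt matrix c (k + 1)) = pvCnt matrix c k := by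
      rw [PySem.List.pyGetD_ofNat matrix k [] hk', pvCnt_rec matrix c k hk']
      unfold pvInd
      split_ifs <;> ring
    rw [hstep]
    rw [ih (col ++ [pvCnt matrix c k]) (by omega)]
    rw [pvRangeSuccMap k (pvCnt matrix c)]
    simp

theorem pvB_eq (matrix : List (List Int)) (n : Nat) (hne : matrix ≠ [])
    (hrect : ∀ row ∈ matrix, row.length = n) :
    matrix_count_number_1_under_alt matrix = (List.range matrix.length).map (pvRow matrix n) := by
  have hlastget : PySem.List.pyGetD matrix (-1) [] = matrix.getLast hne :=
    PySem.List.pyGetD_neg_one matrix [] hne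
  have hn : (PySem.List.pyGetD matrix (-1) []).length = n := by
    rw [hlastget]; exact hrect _ (List.getLast_mem hne)
  simp only [matrix_count_number_1_under_alt]
  rw [hn]
  rw [PySem.List.foldl_append_singleton_eq_map, List.nil_append]
  rw [PySem.List.pyRange_zero_nat matrix.length, List.map_map]
  apply List.map_congr_left
  intro r hr
  rw [List.mem_range] at hr
  simp only [Function.comp_apply]
  rw [pvRow]
  apply List.map_congr_left
  intro c hc
  rw [PySem.List.mem_pyRange_one] at hc
  rw [PySem.List.pyGetD_map_pyRange_of_nonneg _ _ _ _ hc.1 hc.2]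
  have hz : ((0 : Int), ([] : List Int)) = (pvCnt matrix c matrix.length, ([] : List Int)) := by
    rw [pvCnt_length]
  rw [hz, pvLoopB matrix c matrix.length [] le_rfl]
  rw [List.nil_append, pvRevMap matrix.length (pvCnt matrix c)]
  rw [PySem.List.pyGetD_ofNat _ r _ (by simpa using hr)]
  simp

-- ===== VERDICT (by name: the statement is the Claim_ definition above) =====
theorem matrix_count_number_1_under_spec : Claim_equal_matrix_count_number_1_under := by
  intro matrix _ hpre
  obtain ⟨hne, hrect⟩ := hpre
  unfold Spec_matrix_count_number_1_under
  rw [pvA_eq matrix (matrix.headD []).length hne hrect,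
      pvB_eq matrix (matrix.headD []).length hne hrect]
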